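-- pv_equiv track=rewrite | github.com/elhossary/bioinformatics_analysis_toolbox | Poly_T_term/run_poly_T_term.py | seek_window
-- ===== SOURCE A (Python) =====
-- def merge_interval_lists(list_in, merge_range):
--     list_out = []
--     for loc in list_in:
--         if len(list_out) == 0:
--             list_out.append(loc)
--         else:
--             if loc[0] in range(list_out[-1][0], list_out[-1][-1] + merge_range):
--                 list_out[-1][-1] = loc[-1]
--             else:
--                 list_out.append(loc)
--     return list_out
--
-- def seek_window(seq_str, window_size, tolerance):
--     f_locations = []
--     r_locations = []
--     for index, nt in enumerate(seq_str):
--         if len(seq_str) < index + window_size: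
--             break
--         if 0 <= window_size - seq_str[index:index + window_size].count("T") <= tolerance:
--             f_locations.append([index + 1, index + 1 + window_size])
--         if 0 <= window_size - seq_str[index:index + window_size].count("A") <= tolerance:
--             r_locations.append([index + 1, index + 1 + window_size])
--     f_locations = merge_interval_lists(f_locations, 0)
--     r_locations = merge_interval_lists(r_locations, 0)
--     return f_locations, r_locations
-- ===== SOURCE B (Python) =====
-- # Faster exact re-implementation: prefix-sum window counts (O(n)) instead of
-- # re-counting each length-w slice, and a single-pass run merger over start positions.
--
-- def _merge_runs(starts, ws):
--     if not starts:
--         return []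
--     res = []
--     cs, ce = starts[0], starts[0] + ws
--     for s in starts[1:]:
--         if s < ce:
--             ce = s + ws
--         else:
--             res.append([cs, ce])
--             cs, ce = s, s + ws
--     res.append([cs, ce])
--     return res
--
-- def seek_window(seq_str, window_size, tolerance):
--     n = len(seq_str)
--     ws = window_size
--     pT = [0]
--     pA = [0]
--     for c in seq_str:
--         pT.append(pT[-1] + (1 if c == "T" else 0))
--         pA.append(pA[-1] + (1 if c == "A" else 0))
--     f_starts = [i + 1 for i in range(n - ws + 1)
--                 if 0 <= ws - (pT[i + ws] - pT[i]) <= tolerance]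
--     r_starts = [i + 1 for i in range(n - ws + 1)
--                 if 0 <= ws - (pA[i + ws] - pA[i]) <= tolerance]
--     return _merge_runs(f_starts, ws), _merge_runs(r_starts, ws)
-- ===== Notes on version B (the rewrite author's own statement) =====
-- stated objective: faster
-- what changed: Replaces the per-index recount of each length-w slice with O(1) window counts from two prefix-sum arrays built once, and merges runs from start positions in a single pass with an explicit current-interval pair; Pre_ excludes nonpositive window sizes, a degenerate corner where A's empty-slice counting yields accidental values.
-- outside the precondition, e.g. on seek_window('T', 0, 0): A returns ([[1, 1]], [[1, 1]]), B returns ([[1, 1], [2, 2]], [[1, 1], [2, 2]]); on seek_window('AT', -1, 2): A returns ([], []), B raises IndexError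
import Mathlib
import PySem

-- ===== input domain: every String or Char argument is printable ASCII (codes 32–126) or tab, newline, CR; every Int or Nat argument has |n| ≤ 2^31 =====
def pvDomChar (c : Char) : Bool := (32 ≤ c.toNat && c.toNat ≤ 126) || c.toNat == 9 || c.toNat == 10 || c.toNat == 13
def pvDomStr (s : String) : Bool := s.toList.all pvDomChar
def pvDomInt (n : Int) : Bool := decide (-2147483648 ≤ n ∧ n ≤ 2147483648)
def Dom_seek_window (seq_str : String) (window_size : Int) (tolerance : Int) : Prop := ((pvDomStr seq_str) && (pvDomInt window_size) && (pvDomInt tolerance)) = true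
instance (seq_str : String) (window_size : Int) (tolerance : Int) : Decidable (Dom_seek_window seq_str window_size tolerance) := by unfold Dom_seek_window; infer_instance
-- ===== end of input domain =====

-- B replaces A's per-index recount of each length-w slice by prefix-sum window counts
-- (objective: faster) and merges runs from start positions with an explicit current-interval pair.

-- ===== PORT A =====
-- list_out[-1][-1] = v  on a Python list (here always of length 2)
def pySetLast (l : List Int) (v : Int) : List Int := l.dropLast ++ [v]

-- literal port of merge_interval_lists; the append-at-end loop is done as cons + final reverse
def merge_interval_lists (listIn : List (List Int)) (mergeRange : Int) : List (List Int) :=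
  (listIn.foldl (fun acc loc =>
    match acc with
    | [] => [loc]
    | last :: rest =>
      if ((PySem.List.pyGet? loc 0).getD 0) ∈
          PySem.List.pyRange ((PySem.List.pyGet? last 0).getD 0)
            (((PySem.List.pyGet? last (-1)).getD 0) + mergeRange) 1
      then pySetLast last ((PySem.List.pyGet? loc (-1)).getD 0) :: rest
      else loc :: last :: rest) []).reverse

-- the enumerate loop of seek_window, with its break
def seekA_go (s : List Char) (ws tol : Int) :
    List (Int × Char) → List (List Int) → List (List Int) → List (List Int) × List (List Int)
  | [], f, r => (f, r)
  | (idx, _) :: rest, f, r =>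
    if (s.length : Int) < idx + ws then (f, r)
    else
      let win := PySem.List.slice s (some idx) (some (idx + ws))
      let f' := if 0 ≤ ws - (PySem.Chars.count win ['T'] : Int) ∧
                   ws - (PySem.Chars.count win ['T'] : Int) ≤ tol
                then f ++ [[idx + 1, idx + 1 + ws]] else f
      let r' := if 0 ≤ ws - (PySem.Chars.count win ['A'] : Int) ∧
                   ws - (PySem.Chars.count win ['A'] : Int) ≤ tol
                then r ++ [[idx + 1, idx + 1 + ws]] else r
      seekA_go s ws tol rest f' r'

def seek_window (seq_str : String) (window_size : Int) (tolerance : Int) :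
    List (List Int) × List (List Int) :=
  let s := seq_str.toList
  let p := seekA_go s window_size tolerance (PySem.List.enumerate s 0) [] []
  (merge_interval_lists p.1 0, merge_interval_lists p.2 0)

-- ===== PORT B =====
-- _merge_runs from Source B
def merge_runs (starts : List Int) (ws : Int) : List (List Int) :=
  match starts with
  | [] => []
  | s0 :: rest =>
    let t := rest.foldl (fun (st : List (List Int) × Int × Int) s =>
      if s < st.2.2 then (st.1, st.2.1, s + ws)
      else (st.1 ++ [[st.2.1, st.2.2]], s, s + ws)) ([], s0, s0 + ws)
    t.1 ++ [[t.2.1, t.2.2]]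

-- the prefix-sum loop of Source B (pT, pA built by appending pX[-1] + 0/1)
def seekB_prefixes (s : List Char) : List Int × List Int :=
  s.foldl (fun (p : List Int × List Int) c =>
    (p.1 ++ [(PySem.List.pyGet? p.1 (-1)).getD 0 + (if c = 'T' then 1 else 0)],
     p.2 ++ [(PySem.List.pyGet? p.2 (-1)).getD 0 + (if c = 'A' then 1 else 0)]))
    ([0], [0])

-- pT[i+ws] / pT[i] via pyGet? (all indices are in range under Pre_, where Python indexing returns)
def seek_window_alt (seq_str : String) (window_size : Int) (tolerance : Int) :
    List (List Int) × List (List Int) :=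
  let s := seq_str.toList
  let n : Int := (s.length : Int)
  let ws := window_size
  let p := seekB_prefixes s
  let idxs := PySem.List.pyRange 0 (n - ws + 1) 1
  let tc : Int → Int := fun i =>
      (PySem.List.pyGet? p.1 (i + ws)).getD 0 - (PySem.List.pyGet? p.1 i).getD 0
  let ac : Int → Int := fun i =>
      (PySem.List.pyGet? p.2 (i + ws)).getD 0 - (PySem.List.pyGet? p.2 i).getD 0
  let fstarts := (idxs.filter (fun i => decide (0 ≤ ws - tc i ∧ ws - tc i ≤ tolerance))).map (· + 1)
  let rstarts := (idxs.filter (fun i => decide (0 ≤ ws - ac i ∧ ws - ac i ≤ tolerance))).map (· + 1)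
  (merge_runs fstarts window_size, merge_runs rstarts window_size)

-- ===== PRECONDITION & SPEC =====
-- Pre_ excludes nonpositive window sizes: a degenerate corner where A's per-index counting of
-- empty slices yields accidental values nobody would specify (and B's natural range may raise).
def Pre_seek_window (seq_str : String) (window_size : Int) (tolerance : Int) : Prop :=
  1 ≤ window_size
instance (seq_str : String) (window_size : Int) (tolerance : Int) : Decidable (Pre_seek_window seq_str window_size tolerance) := by unfold Pre_seek_window; infer_instance

def pvWitness_seek_window : String × Int × Int := ("TTATG", 2, 1)

def Spec_seek_window (seq_str : String) (window_size : Int) (tolerance : Int) (out : List (List Int) × List (List Int)) : Prop := out = seek_window_alt seq_str window_size tolerance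
instance (seq_str : String) (window_size : Int) (tolerance : Int) (out : List (List Int) × List (List Int)) : Decidable (Spec_seek_window seq_str window_size tolerance out) := by unfold Spec_seek_window; infer_instance

-- ===== CLAIM (what is proved, stated in full; the proofs are below) =====
def Claim_equal_seek_window : Prop := ∀ (seq_str : String) (window_size : Int) (tolerance : Int), Dom_seek_window seq_str window_size tolerance → Pre_seek_window seq_str window_size tolerance → Spec_seek_window seq_str window_size tolerance (seek_window seq_str window_size tolerance)

-- ===== LEMMAS AND PROOFS =====

-- Python str.count with a single-character needle is List.count
theorem chars_count_single_go (c : Char) :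
    ∀ (fuel : Nat) (l : List Char) (acc : Nat), l.length ≤ fuel →
      PySem.Chars.count.go [c] fuel l acc = acc + l.count c := by
  intro fuel
  induction fuel with
  | zero =>
    intro l acc h
    have : l = [] := List.length_eq_zero_iff.mp (Nat.le_zero.mp h)
    subst this; simp [PySem.Chars.count.go]
  | succ n ih =>
    intro l acc h
    cases l with
    | nil => simp [PySem.Chars.count.go]
    | cons x t =>
      by_cases hx : x = c
      · subst hx
        rw [show PySem.Chars.count.go [x] (n+1) (x :: t) acc
              = PySem.Chars.count.go [x] n t (acc + 1) from by
          simp [PySem.Chars.count.go, List.isPrefixOf]]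
        rw [ih t (acc+1) (by simpa using Nat.lt_succ_iff.mp (by simpa using h))]
        simp; omega
      · rw [show PySem.Chars.count.go [c] (n+1) (x :: t) acc
              = PySem.Chars.count.go [c] n t acc from by
          simp [PySem.Chars.count.go, List.isPrefixOf, beq_iff_eq, Ne.symm hx]]
        rw [ih t acc (by simpa using Nat.lt_succ_iff.mp (by simpa using h))]
        simp [hx]

theorem chars_count_single (l : List Char) (c : Char) :
    PySem.Chars.count l [c] = l.count c := by
  simp [PySem.Chars.count, chars_count_single_go c l.length l 0 le_rfl]

-- the reference prefix-count list: entry j is the count of c in the first j characters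
def prefL (s : List Char) (c : Char) : List Int :=
  (List.range (s.length + 1)).map (fun j => ((s.take j).count c : Int))

theorem prefL_last (s : List Char) (c : Char) :
    (PySem.List.pyGet? (prefL s c) (-1)).getD 0 = (s.count c : Int) := by
  have : prefL s c = (List.range s.length).map (fun j => ((s.take j).count c : Int)) ++ [(s.count c : Int)] := by
    simp [prefL, List.range_succ]
  rw [this]; simp [PySem.List.pyGet?, PySem.List.pyIdx?]

theorem prefL_append (s : List Char) (c d : Char) :
    prefL (s ++ [c]) d = prefL s d ++ [(s.count d : Int) + (if c = d then 1 else 0)] := by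
  simp only [prefL, List.length_append, List.length_singleton]
  rw [show s.length + 1 + 1 = (s.length + 1) + 1 from rfl, List.range_succ, List.map_append]
  congr 1
  · apply List.map_congr_left
    intro j hj
    rw [List.take_append_of_le_length (by simpa using Nat.lt_succ_iff.mp (List.mem_range.mp hj))]
  · simp only [List.map_cons, List.map_nil]
    rw [List.take_of_length_le (by simp)]
    by_cases hc : c = d <;> simp [List.count_append, hc]

theorem seekB_prefixes_eq (s : List Char) :
    seekB_prefixes s = (prefL s 'T', prefL s 'A') := by
  induction s using List.reverseRecOn with
  | nil => decide
  | append_singleton s c ih =>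
    rw [seekB_prefixes, List.foldl_append, ← seekB_prefixes, ih]
    simp only [List.foldl_cons, List.foldl_nil, prefL_last, prefL_append]

theorem prefL_get (s : List Char) (d : Char) (j : Nat) (hj : j ≤ s.length) :
    (PySem.List.pyGet? (prefL s d) (j : Int)).getD 0 = ((s.take j).count d : Int) := by
  simp [pysem, prefL, List.getElem?_map, List.getElem?_range (by omega : j < s.length + 1)]

-- A's per-window count and hit test, and the index bound of the enumerate loop
def cntA (s : List Char) (ws : Int) (c : Char) (i : Int) : Int :=
  (PySem.Chars.count (PySem.List.slice s (some i) (some (i + ws))) [c] : Int)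

def hitA (s : List Char) (ws tol : Int) (c : Char) (i : Int) : Bool :=
  decide (0 ≤ ws - cntA s ws c i ∧ ws - cntA s ws c i ≤ tol)

def EboundA (n ws : Int) : Int := if 1 ≤ ws then n - ws + 1 else n

theorem seekA_go_eq (s : List Char) (ws tol : Int) :
    ∀ (t : List Char) (k : Nat) (f r : List (List Int)), k + t.length = s.length →
      seekA_go s ws tol (PySem.List.enumerate t (k : Int)) f r =
        (f ++ ((PySem.List.pyRange (k : Int) (EboundA (s.length : Int) ws) 1).filter
            (hitA s ws tol 'T')).map (fun i => [i + 1, i + 1 + ws]),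
         r ++ ((PySem.List.pyRange (k : Int) (EboundA (s.length : Int) ws) 1).filter
            (hitA s ws tol 'A')).map (fun i => [i + 1, i + 1 + ws])) := by
  intro t
  induction t with
  | nil =>
    intro k f r hk
    simp only [List.length_nil, Nat.add_zero] at hk
    rw [PySem.List.enumerate_nil, PySem.List.pyRange_one_eq_nil (by simp [EboundA, hk]; split <;> omega)]
    simp [seekA_go]
  | cons x t ih =>
    intro k f r hk
    simp only [List.length_cons] at hk
    rw [PySem.List.enumerate_cons, seekA_go]
    by_cases hbrk : (s.length : Int) < (k : Int) + ws
    · rw [if_pos hbrk, PySem.List.pyRange_one_eq_nil (by simp [EboundA]; split <;> omega)]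
      simp
    · rw [if_neg hbrk]
      rw [PySem.List.pyRange_one_cons (by simp [EboundA]; split <;> omega)]
      simp only []
      by_cases hT : 0 ≤ ws - (PySem.Chars.count (PySem.List.slice s (some (k : Int)) (some ((k : Int) + ws))) ['T'] : Int) ∧
          ws - (PySem.Chars.count (PySem.List.slice s (some (k : Int)) (some ((k : Int) + ws))) ['T'] : Int) ≤ tol <;>
        by_cases hA : 0 ≤ ws - (PySem.Chars.count (PySem.List.slice s (some (k : Int)) (some ((k : Int) + ws))) ['A'] : Int) ∧
          ws - (PySem.Chars.count (PySem.List.slice s (some (k : Int)) (some ((k : Int) + ws))) ['A'] : Int) ≤ tol <;>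
        all_goals
          ((first | rw [if_pos hT] | rw [if_neg hT]);
           (first | rw [if_pos hA] | rw [if_neg hA]);
           rw [show ((k : Int) + 1) = (((k + 1 : Nat)) : Int) from by push_cast; ring,
             ih (k + 1) _ _ (by omega), List.filter_cons, List.filter_cons];
           simp only [hitA, cntA, decide_eq_true_eq];
           (split_ifs; simp_all [List.append_assoc]))

-- the merge loops agree, given strictly increasing starts
theorem merge_loop (ws : Int) :
    ∀ (rest : List Int) (cs ce : Int) (res : List (List Int)),
      rest.Pairwise (· < ·) → (∀ x ∈ rest, cs < x) →
      (rest.foldl (fun acc a =>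
        match acc with
        | [] => [[a, a + ws]]
        | last :: rest' =>
          if (PySem.List.pyGet? [a, a + ws] 0).getD 0 ∈
              PySem.List.pyRange ((PySem.List.pyGet? last 0).getD 0)
                (((PySem.List.pyGet? last (-1)).getD 0) + 0) 1
          then pySetLast last ((PySem.List.pyGet? [a, a + ws] (-1)).getD 0) :: rest'
          else [a, a + ws] :: last :: rest') ([cs, ce] :: res.reverse)).reverse
      = (rest.foldl (fun (st : List (List Int) × Int × Int) s =>
          if s < st.2.2 then (st.1, st.2.1, s + ws)
          else (st.1 ++ [[st.2.1, st.2.2]], s, s + ws)) (res, cs, ce)).1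
        ++ [[(rest.foldl (fun (st : List (List Int) × Int × Int) s =>
          if s < st.2.2 then (st.1, st.2.1, s + ws)
          else (st.1 ++ [[st.2.1, st.2.2]], s, s + ws)) (res, cs, ce)).2.1,
          (rest.foldl (fun (st : List (List Int) × Int × Int) s =>
          if s < st.2.2 then (st.1, st.2.1, s + ws)
          else (st.1 ++ [[st.2.1, st.2.2]], s, s + ws)) (res, cs, ce)).2.2]] := by
  intro rest
  induction rest with
  | nil => intro cs ce res _ _; simp
  | cons a t ih =>
    intro cs ce res hp hcs
    have ha : cs < a := hcs a (by simp)
    have hp' := (List.pairwise_cons.mp hp).2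
    have hat := (List.pairwise_cons.mp hp).1
    simp only [List.foldl_cons]
    by_cases hm : a < ce
    · have hcond : (PySem.List.pyGet? [a, a + ws] 0).getD 0 ∈
          PySem.List.pyRange ((PySem.List.pyGet? [cs, ce] 0).getD 0)
            (((PySem.List.pyGet? [cs, ce] (-1)).getD 0) + 0) 1 := by
        simp [PySem.List.pyGet?, PySem.List.pyIdx?, PySem.List.mem_pyRange_one]
        omega
      rw [if_pos hcond, if_pos hm]
      have hset : pySetLast [cs, ce] ((PySem.List.pyGet? [a, a + ws] (-1)).getD 0) = [cs, a + ws] := by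
        simp [pySetLast, PySem.List.pyGet?, PySem.List.pyIdx?]
      rw [hset]
      exact ih cs (a + ws) res hp' (fun x hx => lt_trans ha (hat x hx))
    · have hcond : ¬ ((PySem.List.pyGet? [a, a + ws] 0).getD 0 ∈
          PySem.List.pyRange ((PySem.List.pyGet? [cs, ce] 0).getD 0)
            (((PySem.List.pyGet? [cs, ce] (-1)).getD 0) + 0) 1) := by
        simp [PySem.List.pyGet?, PySem.List.pyIdx?, PySem.List.mem_pyRange_one]
        omega
      rw [if_neg hcond, if_neg hm]
      rw [show [a, a + ws] :: [cs, ce] :: res.reverse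
            = [a, a + ws] :: (res ++ [[cs, ce]]).reverse from by simp]
      exact ih a (a + ws) (res ++ [[cs, ce]]) hp' hat

theorem merge_eq (ws : Int) (starts : List Int) (h : starts.Pairwise (· < ·)) :
    merge_interval_lists (starts.map (fun a => [a, a + ws])) 0 = merge_runs starts ws := by
  cases starts with
  | nil => rfl
  | cons s0 rest =>
    rw [merge_interval_lists, merge_runs, List.map_cons, List.foldl_cons, List.foldl_map]
    have := merge_loop ws rest s0 (s0 + ws) [] (List.pairwise_cons.mp h).2 (List.pairwise_cons.mp h).1
    simpa using this

-- B's O(1) window count equals A's slice count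
theorem cnt_eq (s : List Char) (c : Char) (ws i : Int) (h0 : 0 ≤ i) (h1 : 1 ≤ ws)
    (h2 : i < (s.length : Int) - ws + 1) :
    cntA s ws c i
      = (PySem.List.pyGet? (prefL s c) (i + ws)).getD 0
        - (PySem.List.pyGet? (prefL s c) i).getD 0 := by
  obtain ⟨iN, rfl⟩ : ∃ iN : Nat, i = (iN : Int) := ⟨i.toNat, (Int.toNat_of_nonneg h0).symm⟩
  obtain ⟨w, rfl⟩ : ∃ w : Nat, ws = (w : Int) := ⟨ws.toNat, (Int.toNat_of_nonneg (by omega)).symm⟩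
  have hle : iN + w ≤ s.length := by omega
  rw [show ((iN : Int) + (w : Int)) = (((iN + w : Nat)) : Int) from by push_cast; ring]
  rw [prefL_get s c (iN + w) hle, prefL_get s c iN (by omega)]
  rw [cntA, show ((iN : Int) + (w : Int)) = ((iN : Int) + ((w : Nat) : Int)) from rfl]
  rw [PySem.List.slice_natCast_add, chars_count_single]
  rw [show iN + w = iN + w from rfl, List.take_add, List.count_append]
  push_cast
  ring

theorem side_eq (s : List Char) (ws tol : Int) (c : Char) (idxs : List Int)
    (hp : idxs.Pairwise (· < ·)) :
    merge_interval_lists ((idxs.filter (hitA s ws tol c)).map (fun i => [i + 1, i + 1 + ws])) 0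
      = merge_runs ((idxs.filter (hitA s ws tol c)).map (· + 1)) ws := by
  rw [show (idxs.filter (hitA s ws tol c)).map (fun i => [i + 1, i + 1 + ws])
        = ((idxs.filter (hitA s ws tol c)).map (· + 1)).map (fun a => [a, a + ws]) from by
      rw [List.map_map]; rfl]
  exact merge_eq ws _ (List.Pairwise.map _ (fun a b hab => by omega) (hp.filter _))

-- ===== VERDICT (by name: the statement is the Claim_ definition above) =====
theorem seek_window_spec : Claim_equal_seek_window := by
  intro q ws tol _ hw
  unfold Pre_seek_window at hw
  unfold Spec_seek_window
  show seek_window q ws tol = seek_window_alt q ws tol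
  simp only [seek_window, seek_window_alt]
  have hA0 := seekA_go_eq q.toList ws tol q.toList 0 [] [] (by simp)
  rw [Nat.cast_zero] at hA0
  rw [hA0, seekB_prefixes_eq]
  simp only [List.nil_append]
  rw [show ((q.toList.length : Int) - ws + 1) = EboundA (q.toList.length : Int) ws from by
    rw [EboundA, if_pos hw]]
  have hcond : ∀ c : Char, ∀ i ∈ PySem.List.pyRange 0 (EboundA (q.toList.length : Int) ws) 1,
      (decide (0 ≤ ws - ((PySem.List.pyGet? (prefL q.toList c) (i + ws)).getD 0
            - (PySem.List.pyGet? (prefL q.toList c) i).getD 0) ∧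
        ws - ((PySem.List.pyGet? (prefL q.toList c) (i + ws)).getD 0
            - (PySem.List.pyGet? (prefL q.toList c) i).getD 0) ≤ tol))
      = hitA q.toList ws tol c i := by
    intro c i hi
    rw [PySem.List.mem_pyRange_one, EboundA, if_pos hw] at hi
    rw [hitA, ← cnt_eq q.toList c ws i hi.1 hw hi.2]
  rw [List.filter_congr (hcond 'T'), List.filter_congr (hcond 'A')]
  rw [side_eq q.toList ws tol 'T' _ (PySem.List.pairwise_lt_pyRange_one _ _),
      side_eq q.toList ws tol 'A' _ (PySem.List.pairwise_lt_pyRange_one _ _)]
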